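-- pv_equiv track=rewrite | github.com/UshakovNikita/Multi-Label-Classification--Women-Health-Care | Validation.py | create_custom_param_grid
-- ===== SOURCE A (Python) =====
-- from itertools import product
--
-- def create_custom_param_grid(param_grid, consistent_groups=None):
--     custom_param_grid = []
--
--     # Identify all the skip parameters
--     skip_params = {key: value for key, value in param_grid.items() if 'skip' in key}
--
--     # Check consistency in groups
--     consistent_values = {}
--     if consistent_groups:
--         for group in consistent_groups:
--             group_values = [param_grid[param] for param in group]
--             # Ensure all parameters in a group have the same values
--             if not all(group_values[0] == gv for gv in group_values):
--                 raise ValueError(f"Inconsistent values found in the group {group}")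
--             consistent_values[frozenset(group)] = group_values[0]
--
--     # Helper function to create the custom grid
--     def expand_grid(current_params, remaining_params):
--         if not remaining_params:
--             custom_param_grid.append(current_params.copy())
--             return
--
--         skip_param, values = remaining_params[0]
--         prefix = skip_param.split('skip')[0]
--
--         for skip_value in values:
--             current_params[skip_param] = [skip_value]  # Wrap value in a list
--             if skip_value:
--                 # When skip is True, set related params to None
--                 related_params = [key for key in param_grid if key.startswith(prefix) and key != skip_param]
--                 for rp in related_params:
--                     if 'skip' not in rp:  # Avoid modifying other skip flags
--                         current_params[rp] = [None]  # Wrap value in a list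
--                 expand_grid(current_params, remaining_params[1:])
--             else:
--                 # When skip is False, explore all combinations of related params
--                 related_params = [key for key in param_grid if key.startswith(prefix) and key != skip_param]
--                 related_values = [param_grid[rp] for rp in related_params if 'skip' not in rp]
--                 product_params = [dict(zip(related_params, v)) for v in product(*related_values)]
--
--                 for prod in product_params:
--                     for key, value in prod.items():
--                         prod[key] = [value]  # Wrap value in a list
--                     current_params.update(prod)
--                     expand_grid(current_params, remaining_params[1:])
--
--     remaining_skip_params = list(skip_params.items())
--     expand_grid({}, remaining_skip_params)
--
--     # Handle multiple consistent groups
--     if consistent_groups: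
--         consistent_products = []
--         for group in consistent_groups:
--             values = consistent_values[frozenset(group)]
--             group_product = [{param: [value] for param in group} for value in values]  # Wrap value in a list
--             consistent_products.append(group_product)
--
--         # Generate all combinations of consistent groups
--         combined_consistent_products = list(product(*consistent_products))
--
--         final_grid = []
--         for base_params in custom_param_grid:
--             for consistent_combination in combined_consistent_products:
--                 combined_params = base_params.copy()
--                 for group_values in consistent_combination:
--                     combined_params.update(group_values)
--                 final_grid.append(combined_params)
--         return final_grid
--
--     return custom_param_grid
-- ===== SOURCE B (Python) =====
-- from itertools import product
--
-- def create_custom_param_grid(param_grid, consistent_groups=None):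
--     # Consistency check on groups (unchanged contract: ValueError on mismatch)
--     consistent_values = {}
--     if consistent_groups:
--         for group in consistent_groups:
--             group_values = [param_grid[param] for param in group]
--             if not all(group_values[0] == gv for gv in group_values):
--                 raise ValueError(f"Inconsistent values found in the group {group}")
--             consistent_values[frozenset(group)] = group_values[0]
--
--     # Precompute, once per skip parameter, the branch table: for every skip value the
--     # list of update-op lists that follow the skip assignment.
--     levels = []
--     for sk, vals in param_grid.items():
--         if 'skip' not in sk:
--             continue
--         prefix = sk.split('skip')[0]
--         related = [k for k in param_grid if k.startswith(prefix) and k != sk]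
--         plain = [rp for rp in related if 'skip' not in rp]
--         groups = []
--         for sv in vals:
--             if sv:
--                 groups.append((sv, [[(rp, [None]) for rp in plain]]))
--             else:
--                 combos = product(*(param_grid[rp] for rp in plain))
--                 groups.append((sv, [[(k2, [v2]) for k2, v2 in zip(related, combo)]
--                                     for combo in combos]))
--         levels.append((sk, groups))
--
--     # Iterative depth-first expansion with an explicit worklist instead of recursion.
--     custom_param_grid = []
--     current = {}
--     stack = [('level', levels)]
--     while stack:
--         task = stack.pop()
--         if task[0] == 'level':
--             rem = task[1]
--             if not rem:
--                 custom_param_grid.append(dict(current))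
--             else:
--                 (sk, groups), rem1 = rem[0], rem[1:]
--                 for sv, branches in reversed(groups):
--                     stack.append(('value', sk, branches, rem1, sv))
--         elif task[0] == 'value':
--             _, sk, branches, rem1, sv = task
--             current[sk] = [sv]
--             for ops in reversed(branches):
--                 stack.append(('branch', ops, rem1))
--         else:
--             _, ops, rem1 = task
--             current.update(ops)
--             stack.append(('level', rem1))
--
--     if consistent_groups:
--         consistent_products = []
--         for group in consistent_groups:
--             values = consistent_values[frozenset(group)]
--             group_product = [{param: [value] for param in group} for value in values]
--             consistent_products.append(group_product)
--
--         combined_consistent_products = list(product(*consistent_products))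
--
--         final_grid = []
--         for base_params in custom_param_grid:
--             for consistent_combination in combined_consistent_products:
--                 combined_params = base_params.copy()
--                 for group_values in consistent_combination:
--                     combined_params.update(group_values)
--                 final_grid.append(combined_params)
--         return final_grid
--
--     return custom_param_grid
-- ===== Notes on version B (the rewrite author's own statement) =====
-- stated objective: alternative
-- what changed: Replaced the recursive expand_grid closure that mutates the shared current_params dict with a branch table precomputed once per skip parameter plus an iterative explicit-worklist (stack) depth-first loop; the consistency check and consistent-groups post-processing stay verbatim.
import Mathlib
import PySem

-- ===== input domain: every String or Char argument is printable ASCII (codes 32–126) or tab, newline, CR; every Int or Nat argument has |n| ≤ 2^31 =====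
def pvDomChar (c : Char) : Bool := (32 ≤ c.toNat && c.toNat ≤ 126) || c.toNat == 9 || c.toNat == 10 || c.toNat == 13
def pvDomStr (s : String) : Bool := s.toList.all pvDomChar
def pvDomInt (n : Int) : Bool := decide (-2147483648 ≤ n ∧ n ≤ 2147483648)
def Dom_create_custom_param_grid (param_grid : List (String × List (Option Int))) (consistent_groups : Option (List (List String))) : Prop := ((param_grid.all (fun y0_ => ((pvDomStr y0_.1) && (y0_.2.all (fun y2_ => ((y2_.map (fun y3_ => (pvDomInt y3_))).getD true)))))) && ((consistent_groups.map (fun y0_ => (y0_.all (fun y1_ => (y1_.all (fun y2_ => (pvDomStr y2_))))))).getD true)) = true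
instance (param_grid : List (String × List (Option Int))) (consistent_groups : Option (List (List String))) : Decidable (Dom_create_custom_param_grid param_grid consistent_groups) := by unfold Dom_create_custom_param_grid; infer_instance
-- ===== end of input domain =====

-- B replaces A's recursive expand_grid by an explicit-worklist (stack) depth-first loop over
-- branch tables precomputed once per skip parameter (objective: alternative decomposition; the
-- verbatim-identical consistency check and consistent-groups post-processing are shared helpers
-- of both ports).

-- ===== shared helpers (code that is textually identical in the two Pythons) =====

def pyTruthy (v : Option Int) : Bool :=
  match v with
  | none => false
  | some n => decide (n ≠ 0)

-- 'skip' in key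
def pvHasSkip (k : String) : Bool := PySem.Str.isIn "skip" k

-- key.split('skip')[0]
def pvPrefixOf (sk : String) : String := ((PySem.Str.split? sk "skip").getD []).headD ""

-- [key for key in param_grid if key.startswith(prefix) and key != skip_param]
def pvRelated (pg : PySem.Dict String (List (Option Int))) (sk : String) : List String :=
  pg.keys.filter (fun k => PySem.Str.startswith k (pvPrefixOf sk) && k != sk)

-- list(itertools.product(*lists))
def pvCart {α : Type} : List (List α) → List (List α)
  | [] => [[]]
  | l :: rest => l.flatMap (fun x => (pvCart rest).map (x :: ·))

-- consistent_values insertion: dict keyed by frozenset(group) (overwrite keeps position)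
def pvCvInsert (cv : List (List String × List (Option Int))) (g : List String)
    (v : List (Option Int)) : List (List String × List (Option Int)) :=
  match cv with
  | [] => [(g, v)]
  | (g', v') :: rest =>
    if PySem.Set.equal (PySem.Set.ofList g') (PySem.Set.ofList g) then (g', v) :: rest
    else (g', v') :: pvCvInsert rest g v

-- consistent_values[frozenset(group)]
def pvCvGet (cv : List (List String × List (Option Int))) (g : List String) : List (Option Int) :=
  match cv with
  | [] => []
  | (g', v') :: rest =>
    if PySem.Set.equal (PySem.Set.ofList g') (PySem.Set.ofList g) then v' else pvCvGet rest g

-- the group-consistency check loop; none = the Python raises (KeyError / IndexError / ValueError)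
def pvCheckGroups (pg : PySem.Dict String (List (Option Int))) (groups : List (List String)) :
    Option (List (List String × List (Option Int))) :=
  groups.foldl
    (fun acc group =>
      acc.bind (fun cv =>
        match group.mapM (fun p => pg.get? p) with
        | none => none
        | some gvs =>
          match gvs with
          | [] => none
          | g0 :: _ => if gvs.all (fun gv => gv == g0) then some (pvCvInsert cv group g0) else none))
    (some [])

-- the consistent-groups cross-product post-processing (verbatim in A and in B)
def pvPostProcess (groups : List (List String)) (cv : List (List String × List (Option Int)))
    (custom : List (PySem.Dict String (List (Option Int)))) :
    List (PySem.Dict String (List (Option Int))) :=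
  let consistentProducts := groups.map (fun group =>
    let values := pvCvGet cv group
    values.map (fun v => group.foldl (fun d param => d.insert param [v]) PySem.Dict.empty))
  let combined := pvCart consistentProducts
  custom.flatMap (fun base => combined.map (fun comb =>
    comb.foldl (fun d gd => d.update gd.items) base))

-- ===== PORT A =====

-- expand_grid(current_params, remaining_params); the state (grid, current_params) is threaded
-- through the two Python for-loops as foldl accumulators.
def expandA (pg : PySem.Dict String (List (Option Int))) :
    List (String × List (Option Int)) →
    PySem.Dict String (List (Option Int)) →
    List (PySem.Dict String (List (Option Int))) →
    List (PySem.Dict String (List (Option Int))) × PySem.Dict String (List (Option Int))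
  | [], cur, grid => (grid ++ [cur], cur)
  | (sk, vals) :: rest, cur, grid =>
    vals.foldl
      (fun (st : List (PySem.Dict String (List (Option Int))) × PySem.Dict String (List (Option Int))) sv =>
        let cur1 := st.2.insert sk [sv]
        let related := pvRelated pg sk
        if pyTruthy sv then
          let cur2 := related.foldl (fun c rp => if pvHasSkip rp then c else c.insert rp [none]) cur1
          expandA pg rest cur2 st.1
        else
          let relvals := (related.filter (fun rp => !pvHasSkip rp)).map (fun rp => (pg.get? rp).getD [])
          (pvCart relvals).foldl
            (fun (st2 : List (PySem.Dict String (List (Option Int))) × PySem.Dict String (List (Option Int))) v =>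
              let cur2 := (List.zip related v).foldl (fun c p => c.insert p.1 [p.2]) st2.2
              expandA pg rest cur2 st2.1)
            (st.1, cur1))
      (grid, cur)

def create_custom_param_grid (param_grid : List (String × List (Option Int))) (consistent_groups : Option (List (List String))) : List (List (String × List (Option Int))) :=
  let pg := PySem.Dict.ofList param_grid
  let groupsList := consistent_groups.getD []
  let doGroups := !groupsList.isEmpty
  match (if doGroups then pvCheckGroups pg groupsList else some []) with
  | none => []   -- the Python raises here; excluded by Pre_
  | some cv =>
    let skipParams := pg.items.filter (fun p => pvHasSkip p.1)
    let custom := (expandA pg skipParams PySem.Dict.empty []).1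
    if doGroups then (pvPostProcess groupsList cv custom).map (·.items)
    else custom.map (·.items)

-- ===== PORT B =====

-- one precomputed level: (skip_param, [(skip_value, [update-op list, one per branch])])
abbrev PvLevel : Type :=
  String × List (Option Int × List (List (String × List (Option Int))))

-- the branch table of one skip parameter (levels entry built in B's first loop)
def pvSpecOf (pg : PySem.Dict String (List (Option Int))) (sk : String)
    (vals : List (Option Int)) : PvLevel :=
  let related := pvRelated pg sk
  let plain := related.filter (fun rp => !pvHasSkip rp)
  (sk, vals.map (fun sv =>
    if pyTruthy sv then
      (sv, [plain.map (fun rp => (rp, ([none] : List (Option Int))))])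
    else
      (sv, (pvCart (plain.map (fun rp => (pg.get? rp).getD []))).map (fun combo =>
        (List.zip related combo).map (fun q => (q.1, ([q.2] : List (Option Int))))))))

def pvLevels (pg : PySem.Dict String (List (Option Int))) : List PvLevel :=
  pg.items.foldl (fun acc p => if pvHasSkip p.1 then acc ++ [pvSpecOf pg p.1 p.2] else acc) []

-- worklist tasks of B's iterative depth-first loop
inductive PvTask : Type
  | level (rem : List PvLevel)
  | value (sk : String) (branches : List (List (String × List (Option Int))))
      (rem : List PvLevel) (sv : Option Int)
  | branch (ops : List (String × List (Option Int))) (rem : List PvLevel)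

-- termination measure: total work of one task / of the whole stack
def pvWL : List PvLevel → Nat
  | [] => 1
  | (_, groups) :: rest =>
    1 + (groups.map (fun g => 1 + (g.2.map (fun _ => 1 + pvWL rest)).sum)).sum

def pvWT : PvTask → Nat
  | .level rem => pvWL rem
  | .value _ branches rem _ => 1 + (branches.map (fun _ => 1 + pvWL rem)).sum
  | .branch _ rem => 1 + pvWL rem

-- the while-loop over the worklist, threading (current, custom_param_grid)
def runB : List PvTask → PySem.Dict String (List (Option Int)) →
    List (PySem.Dict String (List (Option Int))) →
    List (PySem.Dict String (List (Option Int))) × PySem.Dict String (List (Option Int))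
  | [], cur, grid => (grid, cur)
  | .level [] :: ts, cur, grid => runB ts cur (grid ++ [cur])
  | .level ((sk, groups) :: rem1) :: ts, cur, grid =>
    runB ((groups.map (fun g => PvTask.value sk g.2 rem1 g.1)) ++ ts) cur grid
  | .value sk branches rem1 sv :: ts, cur, grid =>
    runB ((branches.map (fun ops => PvTask.branch ops rem1)) ++ ts) (cur.insert sk [sv]) grid
  | .branch ops rem1 :: ts, cur, grid =>
    runB (PvTask.level rem1 :: ts) (cur.update ops) grid
termination_by ts _ _ => (ts.map pvWT).sum
decreasing_by
  · simp [pvWT, pvWL]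
  · simp [pvWT, pvWL, Function.comp_def]
    rw [show (List.map (fun i : {x // x ∈ groups} => (↑i : Option Int × List (List (String × List (Option Int)))).2.length * (1 + pvWL rem1)) groups.attach)
        = groups.map (fun i => i.2.length * (1 + pvWL rem1)) from
      List.attach_map_val (l := groups) (f := fun i => i.2.length * (1 + pvWL rem1))]
    omega
  · simp [pvWT, Function.comp_def]
  · simp [pvWT]

def create_custom_param_grid_alt (param_grid : List (String × List (Option Int))) (consistent_groups : Option (List (List String))) : List (List (String × List (Option Int))) :=
  let pg := PySem.Dict.ofList param_grid
  let groupsList := consistent_groups.getD []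
  let doGroups := !groupsList.isEmpty
  match (if doGroups then pvCheckGroups pg groupsList else some []) with
  | none => []   -- the Python raises here; excluded by Pre_
  | some cv =>
    let custom := (runB [PvTask.level (pvLevels pg)] PySem.Dict.empty []).1
    if doGroups then (pvPostProcess groupsList cv custom).map (·.items)
    else custom.map (·.items)

-- ===== PRECONDITION & SPEC =====

-- Pre_ excludes exactly the inputs on which A raises: an empty consistency group (IndexError),
-- a group parameter missing from param_grid (KeyError), or inconsistent values in a group (ValueError).
def Pre_create_custom_param_grid (param_grid : List (String × List (Option Int))) (consistent_groups : Option (List (List String))) : Prop :=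
  (consistent_groups.getD []).all (fun g =>
    !g.isEmpty && g.all (fun p =>
      ((PySem.Dict.ofList param_grid).get? p).isSome &&
      ((PySem.Dict.ofList param_grid).get? p == (PySem.Dict.ofList param_grid).get? (g.headD "")))) = true
instance (param_grid : List (String × List (Option Int))) (consistent_groups : Option (List (List String))) : Decidable (Pre_create_custom_param_grid param_grid consistent_groups) := by unfold Pre_create_custom_param_grid; infer_instance

def pvWitness_create_custom_param_grid : (List (String × List (Option Int))) × Option (List (List String)) :=
  ([("askip", [some 1, some 0]), ("a_r", [some 3, some 4]), ("b", [some 3, some 4])],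
   some [["a_r", "b"]])

def Spec_create_custom_param_grid (param_grid : List (String × List (Option Int))) (consistent_groups : Option (List (List String))) (out : List (List (String × List (Option Int)))) : Prop := out = create_custom_param_grid_alt param_grid consistent_groups
instance (param_grid : List (String × List (Option Int))) (consistent_groups : Option (List (List String))) (out : List (List (String × List (Option Int)))) : Decidable (Spec_create_custom_param_grid param_grid consistent_groups out) := by unfold Spec_create_custom_param_grid; infer_instance

-- ===== CLAIM (what is proved, stated in full; the proofs are below) =====

def Claim_equal_create_custom_param_grid : Prop := ∀ (param_grid : List (String × List (Option Int))) (consistent_groups : Option (List (List String))), Dom_create_custom_param_grid param_grid consistent_groups → Pre_create_custom_param_grid param_grid consistent_groups → Spec_create_custom_param_grid param_grid consistent_groups (create_custom_param_grid param_grid consistent_groups)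

-- ===== LEMMAS AND PROOFS =====

-- step function of A's value loop (names the lambda inside expandA)
def pvStepA (pg : PySem.Dict String (List (Option Int))) (sk : String)
    (rest : List (String × List (Option Int)))
    (st : List (PySem.Dict String (List (Option Int))) × PySem.Dict String (List (Option Int)))
    (sv : Option Int) :
    List (PySem.Dict String (List (Option Int))) × PySem.Dict String (List (Option Int)) :=
  let cur1 := st.2.insert sk [sv]
  let related := pvRelated pg sk
  if pyTruthy sv then
    let cur2 := related.foldl (fun c rp => if pvHasSkip rp then c else c.insert rp [none]) cur1
    expandA pg rest cur2 st.1
  else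
    let relvals := (related.filter (fun rp => !pvHasSkip rp)).map (fun rp => (pg.get? rp).getD [])
    (pvCart relvals).foldl
      (fun (st2 : List (PySem.Dict String (List (Option Int))) × PySem.Dict String (List (Option Int))) v =>
        let cur2 := (List.zip related v).foldl (fun c p => c.insert p.1 [p.2]) st2.2
        expandA pg rest cur2 st2.1)
      (st.1, cur1)

theorem expandA_nil (pg : PySem.Dict String (List (Option Int)))
    (cur : PySem.Dict String (List (Option Int))) (grid : List (PySem.Dict String (List (Option Int)))) :
    expandA pg [] cur grid = (grid ++ [cur], cur) := rfl

theorem expandA_cons (pg : PySem.Dict String (List (Option Int))) (sk : String)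
    (vals : List (Option Int)) (rest : List (String × List (Option Int)))
    (cur : PySem.Dict String (List (Option Int))) (grid : List (PySem.Dict String (List (Option Int)))) :
    expandA pg ((sk, vals) :: rest) cur grid = vals.foldl (pvStepA pg sk rest) (grid, cur) := rfl

-- the levels table is the branch table of each skip parameter, in order
theorem pvLevels_eq (pg : PySem.Dict String (List (Option Int))) :
    pvLevels pg = (pg.items.filter (fun p => pvHasSkip p.1)).map (fun p => pvSpecOf pg p.1 p.2) := by
  rw [pvLevels, PySem.List.foldl_append_if (p := fun p : String × List (Option Int) => pvHasSkip p.1)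
    (f := fun p => pvSpecOf pg p.1 p.2)]
  rfl

-- B's precomputed truthy branch applies exactly A's guarded insert loop
theorem pvTruthyOps (pg : PySem.Dict String (List (Option Int))) (sk : String)
    (cur : PySem.Dict String (List (Option Int))) :
    cur.update (((pvRelated pg sk).filter (fun rp => !pvHasSkip rp)).map
        (fun rp => (rp, ([none] : List (Option Int)))))
      = (pvRelated pg sk).foldl (fun c rp => if pvHasSkip rp then c else c.insert rp [none]) cur := by
  have hfun : (fun (c : PySem.Dict String (List (Option Int))) rp =>
        if pvHasSkip rp then c else c.insert rp [none])
      = (fun (c : PySem.Dict String (List (Option Int))) rp =>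
        if (!pvHasSkip rp) = true then c.insert rp [none] else c) := by
    funext c rp
    cases h : pvHasSkip rp <;> simp [h]
  rw [hfun, PySem.List.foldl_if_eq_foldl_filter]
  show (((pvRelated pg sk).filter (fun rp => !pvHasSkip rp)).map
      (fun rp => (rp, ([none] : List (Option Int))))).foldl (fun acc p => acc.insert p.1 p.2) cur = _
  rw [List.foldl_map]

-- B's precomputed falsy branch applies exactly A's zip insert loop
theorem pvFalsyOps (related : List String) (combo : List (Option Int))
    (cur : PySem.Dict String (List (Option Int))) :
    cur.update ((List.zip related combo).map (fun q => (q.1, ([q.2] : List (Option Int)))))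
      = (List.zip related combo).foldl (fun c p => c.insert p.1 [p.2]) cur := by
  show ((List.zip related combo).map (fun q => (q.1, ([q.2] : List (Option Int))))).foldl
      (fun acc p => acc.insert p.1 p.2) cur = _
  rw [List.foldl_map]

-- the worklist machine simulates A's recursion
theorem pvSim (pg : PySem.Dict String (List (Option Int))) :
    ∀ (rem : List (String × List (Option Int))) (ts : List PvTask)
      (cur : PySem.Dict String (List (Option Int))) (grid : List (PySem.Dict String (List (Option Int)))),
      runB (PvTask.level (rem.map (fun p => pvSpecOf pg p.1 p.2)) :: ts) cur grid
        = runB ts (expandA pg rem cur grid).2 (expandA pg rem cur grid).1 := by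
  intro rem
  induction rem with
  | nil =>
    intro ts cur grid
    rw [expandA_nil, List.map_nil, runB]
  | cons lvl rest ih =>
    intro ts cur grid
    obtain ⟨sk, vals⟩ := lvl
    rw [expandA_cons]
    -- the inner product loop
    have simP : ∀ (combos : List (List (Option Int))) (ts : List PvTask)
        (cur : PySem.Dict String (List (Option Int))) grid,
        runB ((combos.map (fun combo => PvTask.branch
            ((List.zip (pvRelated pg sk) combo).map (fun q => (q.1, ([q.2] : List (Option Int)))))
            (rest.map (fun p => pvSpecOf pg p.1 p.2)))) ++ ts) cur grid
          = runB ts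
              (combos.foldl
                (fun (st2 : List (PySem.Dict String (List (Option Int))) × PySem.Dict String (List (Option Int))) v =>
                  expandA pg rest
                    ((List.zip (pvRelated pg sk) v).foldl (fun c p => c.insert p.1 [p.2]) st2.2) st2.1)
                (grid, cur)).2
              (combos.foldl
                (fun (st2 : List (PySem.Dict String (List (Option Int))) × PySem.Dict String (List (Option Int))) v =>
                  expandA pg rest
                    ((List.zip (pvRelated pg sk) v).foldl (fun c p => c.insert p.1 [p.2]) st2.2) st2.1)
                (grid, cur)).1 := by
      intro combos
      induction combos with
      | nil => intro ts cur grid; rw [List.map_nil, List.nil_append, List.foldl_nil]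
      | cons combo more ihc =>
        intro ts cur grid
        rw [List.map_cons, List.cons_append, runB, pvFalsyOps, ih, ihc, List.foldl_cons]
    -- the value loop
    have simV : ∀ (vs : List (Option Int)) (ts : List PvTask)
        (cur : PySem.Dict String (List (Option Int))) grid,
        runB ((vs.map (fun sv => PvTask.value sk
            (if pyTruthy sv then
              [((pvRelated pg sk).filter (fun rp => !pvHasSkip rp)).map
                (fun rp => (rp, ([none] : List (Option Int))))]
            else
              (pvCart (((pvRelated pg sk).filter (fun rp => !pvHasSkip rp)).map
                  (fun rp => (pg.get? rp).getD []))).map (fun combo =>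
                (List.zip (pvRelated pg sk) combo).map (fun q => (q.1, ([q.2] : List (Option Int))))))
            (rest.map (fun p => pvSpecOf pg p.1 p.2)) sv)) ++ ts) cur grid
          = runB ts (vs.foldl (pvStepA pg sk rest) (grid, cur)).2
              (vs.foldl (pvStepA pg sk rest) (grid, cur)).1 := by
      intro vs
      induction vs with
      | nil => intro ts cur grid; rw [List.map_nil, List.nil_append, List.foldl_nil]
      | cons sv more ihv =>
        intro ts cur grid
        rw [List.map_cons, List.cons_append, List.foldl_cons]
        by_cases ht : pyTruthy sv = true
        · have hstep : pvStepA pg sk rest (grid, cur) sv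
              = expandA pg rest
                  ((pvRelated pg sk).foldl (fun c rp => if pvHasSkip rp then c else c.insert rp [none])
                    (cur.insert sk [sv])) grid := by
            simp [pvStepA, ht]
          rw [hstep, ht]
          simp only [if_true]
          rw [runB, List.map_cons, List.map_nil, List.cons_append, runB, pvTruthyOps, ih]
          have hres := ihv ts
            (expandA pg rest
              ((pvRelated pg sk).foldl (fun c rp => if pvHasSkip rp then c else c.insert rp [none])
                (cur.insert sk [sv])) grid).2
            (expandA pg rest
              ((pvRelated pg sk).foldl (fun c rp => if pvHasSkip rp then c else c.insert rp [none])
                (cur.insert sk [sv])) grid).1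
          exact hres
        · have ht' : pyTruthy sv = false := by
            cases h2 : pyTruthy sv
            · rfl
            · exact absurd h2 ht
          have hstep : pvStepA pg sk rest (grid, cur) sv
              = (pvCart (((pvRelated pg sk).filter (fun rp => !pvHasSkip rp)).map
                  (fun rp => (pg.get? rp).getD []))).foldl
                  (fun (st2 : List (PySem.Dict String (List (Option Int))) × PySem.Dict String (List (Option Int))) v =>
                    expandA pg rest
                      ((List.zip (pvRelated pg sk) v).foldl (fun c p => c.insert p.1 [p.2]) st2.2) st2.1)
                  (grid, cur.insert sk [sv]) := by
            simp [pvStepA, ht']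
          rw [hstep, ht']
          simp only [Bool.false_eq_true, if_false]
          rw [runB, List.map_map]
          rw [show ((fun ops => PvTask.branch ops (rest.map (fun p => pvSpecOf pg p.1 p.2))) ∘
              (fun combo => (List.zip (pvRelated pg sk) combo).map (fun q => (q.1, ([q.2] : List (Option Int))))))
            = (fun combo => PvTask.branch
                ((List.zip (pvRelated pg sk) combo).map (fun q => (q.1, ([q.2] : List (Option Int)))))
                (rest.map (fun p => pvSpecOf pg p.1 p.2))) from rfl]
          rw [simP]
          exact ihv ts _ _
    -- put the level step together
    rw [show (((sk, vals) :: rest).map (fun p => pvSpecOf pg p.1 p.2))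
        = pvSpecOf pg sk vals :: rest.map (fun p => pvSpecOf pg p.1 p.2) from rfl]
    rw [show pvSpecOf pg sk vals
        = (sk, vals.map (fun sv =>
            if pyTruthy sv then
              (sv, [((pvRelated pg sk).filter (fun rp => !pvHasSkip rp)).map
                (fun rp => (rp, ([none] : List (Option Int))))])
            else
              (sv, (pvCart (((pvRelated pg sk).filter (fun rp => !pvHasSkip rp)).map
                  (fun rp => (pg.get? rp).getD []))).map (fun combo =>
                (List.zip (pvRelated pg sk) combo).map (fun q => (q.1, ([q.2] : List (Option Int)))))))) from rfl]
    rw [runB, List.map_map]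
    have hmaps : ((fun g : Option Int × List (List (String × List (Option Int))) =>
          PvTask.value sk g.2 (rest.map (fun p => pvSpecOf pg p.1 p.2)) g.1) ∘
        (fun sv => if pyTruthy sv then
            (sv, [((pvRelated pg sk).filter (fun rp => !pvHasSkip rp)).map
              (fun rp => (rp, ([none] : List (Option Int))))])
          else
            (sv, (pvCart (((pvRelated pg sk).filter (fun rp => !pvHasSkip rp)).map
                (fun rp => (pg.get? rp).getD []))).map (fun combo =>
              (List.zip (pvRelated pg sk) combo).map (fun q => (q.1, ([q.2] : List (Option Int))))))))
        = (fun sv => PvTask.value sk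
            (if pyTruthy sv then
              [((pvRelated pg sk).filter (fun rp => !pvHasSkip rp)).map
                (fun rp => (rp, ([none] : List (Option Int))))]
            else
              (pvCart (((pvRelated pg sk).filter (fun rp => !pvHasSkip rp)).map
                  (fun rp => (pg.get? rp).getD []))).map (fun combo =>
                (List.zip (pvRelated pg sk) combo).map (fun q => (q.1, ([q.2] : List (Option Int))))))
            (rest.map (fun p => pvSpecOf pg p.1 p.2)) sv) := by
      funext sv
      by_cases ht : pyTruthy sv = true <;> simp [ht]
    rw [hmaps, simV]

theorem pv_main (param_grid : List (String × List (Option Int))) (consistent_groups : Option (List (List String))) :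
    create_custom_param_grid param_grid consistent_groups = create_custom_param_grid_alt param_grid consistent_groups := by
  have hgrid : (expandA (PySem.Dict.ofList param_grid)
        ((PySem.Dict.ofList param_grid).items.filter (fun p => pvHasSkip p.1)) PySem.Dict.empty []).1
      = (runB [PvTask.level (pvLevels (PySem.Dict.ofList param_grid))] PySem.Dict.empty []).1 := by
    rw [pvLevels_eq, pvSim, runB]
  rw [create_custom_param_grid, create_custom_param_grid_alt]
  cases hm : (if (!(consistent_groups.getD []).isEmpty) = true
      then pvCheckGroups (PySem.Dict.ofList param_grid) (consistent_groups.getD [])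
      else some []) with
  | none => rfl
  | some cv =>
    simp only []
    rw [hgrid]

-- ===== VERDICT (by name: the statement is the Claim_ definition above) =====
theorem create_custom_param_grid_spec : Claim_equal_create_custom_param_grid := by
  intro pg cg _ _
  exact pv_main pg cg
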